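-- pv_equiv track=rewrite | github.com/bssrdf/pyleet | MaximumGeneticDifferenceQuery.py | maxGeneticDifference
-- ===== SOURCE A (Python) =====
-- from typing import List
--
-- class TrieNode:
--     def __init__(self):
--         self.child = {}
--         self.go = 0  # Number of elements goes through this node
--     def increase(self, number, d):
--         cur = self
--         for i in range(17, -1, -1):
--             bit = (number >> i) & 1
--             if bit not in cur.child: cur.child[bit] = TrieNode()
--             cur = cur.child[bit]
--             cur.go += d
--     def findMax(self, number):
--         cur, ans = self, 0
--         for i in range(17, -1, -1):
--             bit = (number >> i) & 1
--             if (1-bit) in cur.child and cur.child[1-bit].go > 0: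
--                 cur = cur.child[1 - bit]
--                 ans |= (1 << i)
--             else:
--                 cur = cur.child[bit]
--         return ans
--
-- def maxGeneticDifference(parents: List[int], queries: List[List[int]]) -> List[int]:
--     qs = queries
--     n, m, root = len(parents), len(qs), -1
--     ans, trieNode = [-1] * m, TrieNode()
--     graph, queryByNode = [[] for _ in range(n)], [[] for _ in range(n)]
--     for i, p in enumerate(parents):
--         if p == -1: root = i
--         else: graph[p].append(i)
--
--     for i, q in enumerate(qs):
--         queryByNode[q[0]].append((q[1], i))  # node -> list of pairs (val, idx)
--
--     def dfs(u):
--         trieNode.increase(u, 1)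
--         for val, idx in queryByNode[u]:
--             ans[idx] = trieNode.findMax(val)
--         for v in graph[u]:
--             dfs(v)
--         trieNode.increase(u, -1)
--
--     dfs(root)
--     return ans
-- ===== SOURCE B (Python) =====
-- from typing import List
--
-- def maxGeneticDifference(parents: List[int], queries: List[List[int]]) -> List[int]:
--     n, root = len(parents), -1
--     graph = [[] for _ in range(n)]
--     queryByNode = [[] for _ in range(n)]
--     for i, p in enumerate(parents):
--         if p == -1: root = i
--         else: graph[p].append(i)
--     for i, q in enumerate(queries):
--         queryByNode[q[0]].append((q[1], i))
--
--     ans = [-1] * len(queries)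
--     # instead of a node-object trie: a flat counter of (level, prefix) pairs,
--     # cnt[(i, pref)] = number of live ancestors whose 18-bit key starts with pref down to bit i
--     cnt = {}
--     MASK = (1 << 18) - 1
--
--     def add(x, d):
--         x %= MASK + 1
--         for i in range(18):
--             k = (i, x >> i)
--             cnt[k] = cnt.get(k, 0) + d
--
--     def findBest(val):
--         res, pref = 0, 0
--         for i in range(17, -1, -1):
--             bit = (val >> i) & 1
--             want = 2 * pref + (1 - bit)
--             if cnt.get((i, want), 0) > 0:
--                 pref = want
--                 res |= 1 << i
--             else:
--                 pref = 2 * pref + bit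
--         return res
--
--     # iterative DFS with ENTER/EXIT frames replaces the recursion
--     stack = [(root, True)]
--     while stack:
--         u, enter = stack.pop()
--         if enter:
--             add(u, 1)
--             for val, idx in queryByNode[u]:
--                 ans[idx] = findBest(val)
--             stack.append((u, False))
--             for v in reversed(graph[u]):
--                 stack.append((v, True))
--         else:
--             add(u, -1)
--     return ans
-- ===== Notes on version B (the rewrite author's own statement) =====
-- stated objective: alternative
-- what changed: The pointer-trie of TrieNode objects is replaced by a flat counter dict keyed by (bit-level, prefix) pairs (insert/remove bump 18 counters, the max-XOR query greedily extends a numeric prefix against the counters), and the recursive dfs is replaced by an iterative ENTER/EXIT stack loop.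
import Mathlib
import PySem

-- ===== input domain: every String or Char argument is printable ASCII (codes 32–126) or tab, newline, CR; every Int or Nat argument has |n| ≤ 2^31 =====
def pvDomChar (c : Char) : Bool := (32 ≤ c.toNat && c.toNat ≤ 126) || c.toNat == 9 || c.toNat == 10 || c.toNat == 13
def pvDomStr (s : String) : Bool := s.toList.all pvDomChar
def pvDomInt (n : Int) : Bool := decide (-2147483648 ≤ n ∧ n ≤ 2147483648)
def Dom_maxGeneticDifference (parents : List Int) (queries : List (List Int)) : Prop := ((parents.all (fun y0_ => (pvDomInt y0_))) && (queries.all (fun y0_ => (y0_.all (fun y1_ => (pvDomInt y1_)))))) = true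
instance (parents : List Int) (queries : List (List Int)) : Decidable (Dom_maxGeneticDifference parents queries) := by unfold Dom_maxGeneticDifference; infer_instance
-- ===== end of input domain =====

-- B replaces A's pointer trie of TrieNode objects by a flat counter dict keyed by
-- (bit-level, prefix), and A's recursive dfs by an iterative ENTER/EXIT stack loop:
-- an alternative data structure and decomposition, no speed claim.

-- ===== PORT A =====
-- The TrieNode class (child dict keyed by bit 0/1, go counter); a missing dict entry is .missing.
inductive PvTrie
  | missing
  | node : Int → PvTrie → PvTrie → PvTrie
deriving DecidableEq, Repr

def PvTrie.goOf : PvTrie → Int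
  | .missing => 0
  | .node g _ _ => g

def PvTrie.childOf : PvTrie → Int → PvTrie
  | .missing, _ => .missing
  | .node _ c0 c1, bit => if bit = 0 then c0 else c1

def PvTrie.setChild : PvTrie → Int → PvTrie → PvTrie
  | .missing, bit, c => if bit = 0 then .node 0 c .missing else .node 0 .missing c
  | .node g c0 c1, bit, c => if bit = 0 then .node g c c1 else .node g c0 c

def PvTrie.addGo : PvTrie → Int → PvTrie
  | .missing, d => .node d .missing .missing
  | .node g c0 c1, d => .node (g + d) c0 c1

-- TrieNode.increase: loop over i = 17 .. 0 (k = i + 1); bit = (number >> i) & 1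
def trieInc : PvTrie → Int → Int → Nat → PvTrie
  | t, _, _, 0 => t
  | t, num, d, k+1 =>
    let bit := PySem.Int.band (PySem.Int.floordiv num ((2:Int)^k)) 1
    let c := t.childOf bit
    let c := match c with | .missing => PvTrie.node 0 .missing .missing | x => x
    t.setChild bit (trieInc (c.addGo d) num d k)

-- TrieNode.findMax: the 'in cur.child and go > 0' test is goOf > 0 (missing has goOf = 0)
def trieFind : PvTrie → Int → Nat → Int → Int
  | _, _, 0, ans => ans
  | t, num, k+1, ans =>
    let bit := PySem.Int.band (PySem.Int.floordiv num ((2:Int)^k)) 1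
    let opp := t.childOf (1 - bit)
    if opp.goOf > 0 then trieFind opp num k (PySem.Int.bor ans ((2:Int)^k))
    else trieFind (t.childOf bit) num k ans

-- xss[i].append(v) with Python index semantics (out of range = IndexError, outside Pre_)
def pyAppendAt {α : Type} (xss : List (List α)) (i : Int) (v : α) : List (List α) :=
  let j := if i < 0 then i + xss.length else i
  if 0 ≤ j ∧ j < xss.length then xss.set j.toNat ((xss.getD j.toNat []) ++ [v]) else xss

-- for i, p in enumerate(parents): if p == -1: root = i else graph[p].append(i)
def buildGraph (parents : List Int) : List (List Int) × Int :=
  (PySem.List.enumerate parents 0).foldl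
    (fun gr ip => if ip.2 = -1 then (gr.1, ip.1) else (pyAppendAt gr.1 ip.2 ip.1, gr.2))
    (List.replicate parents.length [], -1)

-- for i, q in enumerate(queries): queryByNode[q[0]].append((q[1], i))
def buildQbn (n : Nat) (queries : List (List Int)) : List (List (Int × Int)) :=
  (PySem.List.enumerate queries 0).foldl
    (fun qbn iq =>
      match PySem.List.pyGet? iq.2 0, PySem.List.pyGet? iq.2 1 with
      | some a, some b => pyAppendAt qbn a (b, iq.1)
      | _, _ => qbn)
    (List.replicate n [])

-- the first two lines of A's dfs body: trie.increase(u, 1); answer u's queries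
def visitNode (qbn : List (List (Int × Int))) (u : Int) (st : PvTrie × List Int) :
    PvTrie × List Int :=
  let t1 := trieInc st.1 u 1 18
  (t1, (PySem.List.pyGetD qbn u []).foldl
         (fun a vi => a.set vi.2.toNat (trieFind t1 vi.1 18 0)) st.2)

-- A's recursive dfs; the fuel argument only makes it total (Pre_ trees have depth ≤ n)
def dfsA (graph : List (List Int)) (qbn : List (List (Int × Int))) :
    Nat → Int → PvTrie × List Int → PvTrie × List Int
  | 0, _, st => st
  | f+1, u, st =>
    let st1 := visitNode qbn u st
    let st2 := (PySem.List.pyGetD graph u []).foldl (fun s v => dfsA graph qbn f v s) st1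
    (trieInc st2.1 u (-1) 18, st2.2)

def maxGeneticDifference (parents : List Int) (queries : List (List Int)) : List Int :=
  let g := buildGraph parents
  let qbn := buildQbn parents.length queries
  (dfsA g.1 qbn (parents.length + 1) g.2
    (PvTrie.node 0 .missing .missing, List.replicate queries.length (-1))).2

-- ===== PORT B =====
-- B's trie replacement: cnt[(i, pref)] = number of live ancestors whose 18-bit key,
-- truncated to its bits above position i, equals pref.

-- add(x, d): x %= 1 << 18; for i in range(18): bump cnt[(i, x >> i)] by d
def cntAdd (c : PySem.Dict (Int × Int) Int) (x d : Int) : PySem.Dict (Int × Int) Int :=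
  let xm := PySem.Int.mod x ((2:Int)^18)
  (List.range 18).foldl
    (fun (c : PySem.Dict (Int × Int) Int) (i : Nat) =>
      let k := ((i : Int), PySem.Int.floordiv xm ((2:Int)^i))
      c.insert k (c.getD k 0 + d)) c

-- findBest(val): greedily extend the numeric prefix, preferring the opposite bit
def cntFindAux (c : PySem.Dict (Int × Int) Int) (val : Int) : Nat → Int → Int → Int
  | 0, _, res => res
  | k+1, pref, res =>
    let bit := PySem.Int.band (PySem.Int.floordiv val ((2:Int)^k)) 1
    let want := 2 * pref + (1 - bit)
    if c.getD (((k : Nat) : Int), want) 0 > 0 then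
      cntFindAux c val k want (PySem.Int.bor res ((2:Int)^k))
    else cntFindAux c val k (2 * pref + bit) res

-- the ENTER branch of the loop: add(u, 1); answer u's queries from the counters
def visitAlt (qbn : List (List (Int × Int))) (u : Int)
    (st : PySem.Dict (Int × Int) Int × List Int) :
    PySem.Dict (Int × Int) Int × List Int :=
  let c1 := cntAdd st.1 u 1
  (c1, (PySem.List.pyGetD qbn u []).foldl
         (fun a vi => a.set vi.2.toNat (cntFindAux c1 vi.1 18 0 0)) st.2)

-- stack frames (u, enter); enter carries the fuel tag that makes the loop total
inductive PvFrame
  | enter (u : Int) (f : Nat)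
  | exit (u : Int)
deriving DecidableEq, Repr

def frameW (c : Nat) : PvFrame → Nat
  | .enter _ f => (c + 2) ^ f
  | .exit _ => 1

lemma len_pyGetD_le (xs : List (List Int)) (i : Int) :
    (PySem.List.pyGetD xs i ([] : List Int)).length ≤ (xs.map List.length).sum := by
  rcases h : PySem.List.pyGet? xs i with _ | l
  · simp [PySem.List.pyGetD, h]
  · have hm : l ∈ xs := PySem.List.mem_of_pyGet?_eq_some xs h
    have : l.length ∈ xs.map List.length := List.mem_map_of_mem hm
    have := List.single_le_sum (by intro x _; exact Nat.zero_le x) _ this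
    simpa [PySem.List.pyGetD, h] using this

-- the while-stack loop of B: pop; ENTER visits and pushes EXIT + children, EXIT undoes
def runAlt (graph : List (List Int)) (qbn : List (List (Int × Int))) :
    List PvFrame → PySem.Dict (Int × Int) Int × List Int →
      PySem.Dict (Int × Int) Int × List Int
  | [], st => st
  | .exit u :: rest, st => runAlt graph qbn rest (cntAdd st.1 u (-1), st.2)
  | .enter _ 0 :: rest, st => runAlt graph qbn rest st
  | .enter u (f+1) :: rest, st =>
      runAlt graph qbn
        ((PySem.List.pyGetD graph u []).map (fun v => PvFrame.enter v f)
          ++ PvFrame.exit u :: rest)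
        (visitAlt qbn u st)
termination_by stack _ => (stack.map (frameW ((graph.map List.length).sum))).sum
decreasing_by
  · simp [frameW]
  · simp [frameW]
  · simp only [List.map_append, List.map_map, List.map_cons, List.sum_append, List.sum_cons,
      Function.comp_def, frameW, Nat.succ_eq_add_one]
    have hlen := len_pyGetD_le graph u
    set c := (graph.map List.length).sum
    have hconst : ((PySem.List.pyGetD graph u []).map fun _ => (c + 2) ^ f).sum
        = (PySem.List.pyGetD graph u []).length * (c + 2) ^ f := by
      induction (PySem.List.pyGetD graph u []) with
      | nil => simp
      | cons x xs _ => simp [Nat.succ_mul, Nat.add_comm]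
    have hpow : 1 ≤ (c + 2) ^ f := Nat.one_le_pow _ _ (by omega)
    have : (PySem.List.pyGetD graph u []).length * (c + 2) ^ f + 1 < (c + 2) ^ (f + 1) := by
      have h1 : (PySem.List.pyGetD graph u []).length * (c + 2) ^ f ≤ c * (c + 2) ^ f :=
        Nat.mul_le_mul_right _ hlen
      have h2 : (c + 2) ^ (f + 1) = c * (c + 2) ^ f + 2 * (c + 2) ^ f := by ring
      omega
    omega

def maxGeneticDifference_alt (parents : List Int) (queries : List (List Int)) : List Int :=
  let g := buildGraph parents
  let qbn := buildQbn parents.length queries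
  (runAlt g.1 qbn [PvFrame.enter g.2 (parents.length + 1)]
    (PySem.Dict.empty, List.replicate queries.length (-1))).2

-- ===== PRECONDITION & SPEC =====
-- shape helper on the input only: does the parent chain starting at node i (with Python's
-- negative-index resolution) come back to node n-1 before hitting a -1?  Used only when
-- parents contains no -1, where A's dfs(-1) wraps to the children of node n-1 and recurses
-- forever exactly when n-1 lies on a parent-cycle.
def backToLastF (parents : List Int) : Nat → Int → Bool
  | 0, _ => false
  | k+1, i =>
    match PySem.List.pyGet? parents i with
    | none => false
    | some p =>
      if p = -1 then false
      else
        let r := if p < 0 then p + parents.length else p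
        if r = (parents.length : Int) - 1 then true else backToLastF parents k r

-- Pre_ = exactly the inputs on which the Python A returns (everything else raises IndexError
-- or RecursionError): nonempty parents, parent values and query nodes are in-range Python
-- indices, queries have ≥ 2 entries, and if no -1 root exists the wrap target n-1 is not on
-- a parent-cycle (validated against A on 20000 random inputs).
def Pre_maxGeneticDifference (parents : List Int) (queries : List (List Int)) : Prop :=
  0 < parents.length ∧
  (∀ p ∈ parents, -(parents.length : Int) ≤ p ∧ p < parents.length) ∧
  (∀ q ∈ queries, 2 ≤ q.length ∧ -(parents.length : Int) ≤ q.headI ∧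
      q.headI < parents.length) ∧
  ((-1 : Int) ∈ parents ∨
    backToLastF parents parents.length ((parents.length : Int) - 1) = false)

instance (parents : List Int) (queries : List (List Int)) :
    Decidable (Pre_maxGeneticDifference parents queries) := by
  unfold Pre_maxGeneticDifference; infer_instance

def pvWitness_maxGeneticDifference : List Int × List (List Int) :=
  ([-1, 0, 0], [[1, 2], [2, 3]])

def Spec_maxGeneticDifference (parents : List Int) (queries : List (List Int)) (out : List Int) : Prop := out = maxGeneticDifference_alt parents queries
instance (parents : List Int) (queries : List (List Int)) (out : List Int) : Decidable (Spec_maxGeneticDifference parents queries out) := by unfold Spec_maxGeneticDifference; infer_instance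

-- ===== CLAIM (what is proved, stated in full; the proofs are below) =====
def Claim_equal_maxGeneticDifference : Prop := ∀ (parents : List Int) (queries : List (List Int)), Dom_maxGeneticDifference parents queries → Pre_maxGeneticDifference parents queries → Spec_maxGeneticDifference parents queries (maxGeneticDifference parents queries)

-- ===== LEMMAS AND PROOFS =====

-- B's dfs, recursively (proof-side only): what one ENTER frame of runAlt computes
def dfsB (graph : List (List Int)) (qbn : List (List (Int × Int))) :
    Nat → Int → PySem.Dict (Int × Int) Int × List Int →
      PySem.Dict (Int × Int) Int × List Int
  | 0, _, st => st
  | f+1, u, st =>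
    let st1 := visitAlt qbn u st
    let st2 := (PySem.List.pyGetD graph u []).foldl (fun s v => dfsB graph qbn f v s) st1
    (cntAdd st2.1 u (-1), st2.2)

-- the stack machine simulates the recursion: one ENTER frame runs one dfsB call
lemma runAlt_enter (graph : List (List Int)) (qbn : List (List (Int × Int))) :
    ∀ (f : Nat) (u : Int) (rest : List PvFrame)
      (st : PySem.Dict (Int × Int) Int × List Int),
      runAlt graph qbn (PvFrame.enter u f :: rest) st
        = runAlt graph qbn rest (dfsB graph qbn f u st) := by
  intro f
  induction f with
  | zero => intro u rest st; rw [runAlt]; rfl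
  | succ f ih =>
    have hlist : ∀ (children : List Int) (rest : List PvFrame)
        (st : PySem.Dict (Int × Int) Int × List Int),
        runAlt graph qbn ((children.map (fun v => PvFrame.enter v f)) ++ rest) st
          = runAlt graph qbn rest (children.foldl (fun s v => dfsB graph qbn f v s) st) := by
      intro children
      induction children with
      | nil => intro rest st; simp
      | cons v vs ihc =>
        intro rest st
        simp only [List.map_cons, List.cons_append, List.foldl_cons]
        rw [ih, ihc]
    intro u rest st
    rw [runAlt, hlist, runAlt, dfsB]

-- ---- arithmetic about bits, floor division and the 2^18 mask ----

lemma pvBit01 (m : Int) : PySem.Int.band m 1 = 0 ∨ PySem.Int.band m 1 = 1 := by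
  rw [PySem.Int.band_one]
  have h1 := PySem.Int.mod_nonneg m (b := 2) (by norm_num)
  have h2 := PySem.Int.mod_lt m (b := 2) (by norm_num)
  omega

lemma pvFdivStep (y : Int) (k : Nat) :
    PySem.Int.floordiv y ((2:Int)^k)
      = 2 * PySem.Int.floordiv y ((2:Int)^(k+1))
        + PySem.Int.band (PySem.Int.floordiv y ((2:Int)^k)) 1 := by
  have hpk : (0:Int) < 2^k := by positivity
  have hpk1 : (0:Int) < 2^(k+1) := by positivity
  rw [PySem.Int.band_one, PySem.Int.floordiv_eq_ediv_of_pos hpk,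
      PySem.Int.floordiv_eq_ediv_of_pos hpk1,
      PySem.Int.mod_eq_emod_of_pos (by norm_num : (0:Int) < 2)]
  have hdd : y / 2^(k+1) = y / 2^k / 2 := by
    rw [pow_succ]
    exact (Int.ediv_ediv_of_nonneg (le_of_lt hpk)).symm
  omega

lemma pvBitsAgree (x : Int) (k : Nat) (hk : k < 18) :
    PySem.Int.band (PySem.Int.floordiv x ((2:Int)^k)) 1
      = PySem.Int.band (PySem.Int.floordiv (PySem.Int.mod x ((2:Int)^18)) ((2:Int)^k)) 1 := by
  have hpk : (0:Int) < 2^k := by positivity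
  set t := PySem.Int.floordiv x ((2:Int)^18) with ht
  set xm := PySem.Int.mod x ((2:Int)^18) with hxmdef
  have hx : t * 2^18 + xm = x := PySem.Int.floordiv_mul_add_mod x ((2:Int)^18)
  rw [PySem.Int.band_one, PySem.Int.band_one,
      PySem.Int.mod_eq_emod_of_pos (by norm_num : (0:Int) < 2),
      PySem.Int.mod_eq_emod_of_pos (by norm_num : (0:Int) < 2),
      PySem.Int.floordiv_eq_ediv_of_pos hpk, PySem.Int.floordiv_eq_ediv_of_pos hpk]
  have h18 : (2:Int)^18 = 2^(17-k) * 2 * 2^k := by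
    have h2 : (17 - k) + 1 + k = 18 := by omega
    rw [← h2, pow_add, pow_add, pow_one]
  have hsplit : x = xm + (t * (2^(17-k) * 2)) * 2^k := by
    calc x = t * 2^18 + xm := hx.symm
    _ = xm + (t * (2^(17-k) * 2)) * 2^k := by rw [h18]; ring
  have hdiv : x / 2^k = xm / 2^k + t * (2^(17-k) * 2) := by
    conv_lhs => rw [hsplit]
    exact Int.add_mul_ediv_right _ _ (ne_of_gt hpk)
  have hmul : t * ((2:Int)^(17-k) * 2) = (t * 2^(17-k)) * 2 := by ring
  rw [hmul] at hdiv
  set s := t * (2:Int)^(17-k) with hs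
  omega

lemma pvFdivTop (y : Int) (hy : 0 ≤ y) (hlt : y < 2^18) :
    PySem.Int.floordiv y ((2:Int)^18) = 0 := by
  rw [PySem.Int.floordiv_eq_ediv_of_pos (by positivity)]
  exact Int.ediv_eq_zero_of_lt hy hlt

-- ---- what cntAdd does to every counter ----

lemma cntAddAux_getD (xm d : Int) :
    ∀ (m : Nat) (c : PySem.Dict (Int × Int) Int) (k : Nat) (q : Int),
      ((List.range m).foldl
          (fun (c : PySem.Dict (Int × Int) Int) (i : Nat) =>
            let key := ((i : Int), PySem.Int.floordiv xm ((2:Int)^i))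
            c.insert key (c.getD key 0 + d)) c).getD ((k:Int), q) 0
        = (if k < m ∧ q = PySem.Int.floordiv xm ((2:Int)^k) then d else 0)
            + c.getD ((k:Int), q) 0 := by
  intro m
  induction m with
  | zero => intro c k q; simp
  | succ m ih =>
    intro c k q
    rw [List.range_succ, List.foldl_append, List.foldl_cons, List.foldl_nil]
    rw [PySem.Dict.getD_insert]
    by_cases hkey : ((k:Int), q) = (((m:Nat):Int), PySem.Int.floordiv xm ((2:Int)^m))
    · have hk : k = m := by
        have h1 : ((k:Int)) = ((m:Int)) := by simpa using congrArg Prod.fst hkey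
        exact_mod_cast h1
      subst hk
      have hq : q = PySem.Int.floordiv xm ((2:Int)^k) := by
        simpa using congrArg Prod.snd hkey
      subst hq
      rw [if_pos hkey, ih, if_neg (by simp), if_pos ⟨Nat.lt_succ_self k, rfl⟩]
      omega
    · rw [if_neg hkey, ih]
      have : (k < m + 1 ∧ q = PySem.Int.floordiv xm ((2:Int)^k))
          ↔ (k < m ∧ q = PySem.Int.floordiv xm ((2:Int)^k)) := by
        constructor
        · rintro ⟨h1, h2⟩
          refine ⟨?_, h2⟩
          rcases Nat.lt_succ_iff_lt_or_eq.mp h1 with h | h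
          · exact h
          · exact absurd (by rw [h2, h]) hkey
        · rintro ⟨h1, h2⟩; exact ⟨Nat.lt_succ_of_lt h1, h2⟩
      rw [if_congr this rfl rfl]

lemma cntAdd_getD (c : PySem.Dict (Int × Int) Int) (x d : Int) (k : Nat) (q : Int) :
    (cntAdd c x d).getD ((k:Int), q) 0
      = (if k < 18 ∧ q = PySem.Int.floordiv (PySem.Int.mod x ((2:Int)^18)) ((2:Int)^k)
          then d else 0)
          + c.getD ((k:Int), q) 0 := by
  unfold cntAdd
  exact cntAddAux_getD (PySem.Int.mod x ((2:Int)^18)) d 18 c k q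

-- ---- small facts about the trie operations ----

lemma goOf_setChild (t c : PvTrie) (b : Int) : (t.setChild b c).goOf = t.goOf := by
  cases t <;> simp only [PvTrie.setChild] <;> split <;> rfl

lemma goOf_trieInc (x d : Int) : ∀ (k : Nat) (t : PvTrie),
    (trieInc t x d k).goOf = t.goOf := by
  intro k t
  cases k with
  | zero => rfl
  | succ k => rw [trieInc]; exact goOf_setChild _ _ _

lemma childOf_setChild (t c : PvTrie) (b b' : Int)
    (hb : b = 0 ∨ b = 1) (hb' : b' = 0 ∨ b' = 1) :
    (t.setChild b c).childOf b' = if b' = b then c else t.childOf b' := by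
  rcases hb with hb | hb <;> rcases hb' with hb' | hb' <;> subst hb <;> subst hb' <;>
    cases t <;> simp [PvTrie.setChild, PvTrie.childOf]

lemma childOf_addGo (t : PvTrie) (d b : Int) : (t.addGo d).childOf b = t.childOf b := by
  cases t with
  | missing => simp only [PvTrie.addGo, PvTrie.childOf]; split <;> rfl
  | node g c0 c1 => rfl

lemma childOf_norm (t : PvTrie) (b : Int) :
    (match t with | .missing => PvTrie.node 0 .missing .missing | x => x).childOf b
      = t.childOf b := by
  cases t with
  | missing => simp only [PvTrie.childOf]; split <;> rfl
  | node g c0 c1 => rfl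

lemma goOf_norm_addGo (t : PvTrie) (d : Int) :
    ((match t with | .missing => PvTrie.node 0 .missing .missing | x => x).addGo d).goOf
      = t.goOf + d := by
  cases t with
  | missing => simp only [PvTrie.addGo, PvTrie.goOf]
  | node g c0 c1 => rfl

-- ---- the simulation relation: trie node counts = counter values ----

def PvRel : Nat → Int → PvTrie → PySem.Dict (Int × Int) Int → Prop
  | 0, _, _, _ => True
  | k+1, pref, t, c =>
      (t.childOf 0).goOf = c.getD ((k : Int), 2*pref) 0 ∧
      (t.childOf 1).goOf = c.getD ((k : Int), 2*pref+1) 0 ∧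
      PvRel k (2*pref) (t.childOf 0) c ∧ PvRel k (2*pref+1) (t.childOf 1) c

lemma rel_of_childOf (k : Nat) (pref : Int) (t t' : PvTrie)
    (c : PySem.Dict (Int × Int) Int)
    (h0 : t'.childOf 0 = t.childOf 0) (h1 : t'.childOf 1 = t.childOf 1)
    (h : PvRel k pref t c) : PvRel k pref t' c := by
  cases k with
  | zero => trivial
  | succ k => unfold PvRel; rw [h0, h1]; exact h

lemma rel_missing_empty : ∀ (k : Nat) (pref : Int),
    PvRel k pref PvTrie.missing (PySem.Dict.empty : PySem.Dict (Int × Int) Int) := by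
  intro k
  induction k with
  | zero => intro pref; trivial
  | succ k ih =>
    intro pref
    refine ⟨?_, ?_, ih _, ih _⟩ <;>
      simp [PvTrie.childOf, PvTrie.goOf, PySem.Dict.getD, PySem.Dict.get?, PySem.Dict.empty]

-- findMax over the trie = the greedy prefix walk over the counters
lemma find_eq (c : PySem.Dict (Int × Int) Int) (val : Int) :
    ∀ (k : Nat) (pref res : Int) (t : PvTrie), PvRel k pref t c →
      trieFind t val k res = cntFindAux c val k pref res := by
  intro k
  induction k with
  | zero => intro pref res t _; rfl
  | succ k ih =>
    intro pref res t h
    obtain ⟨h0, h1, r0, r1⟩ := h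
    rw [trieFind, cntFindAux]
    rcases pvBit01 (PySem.Int.floordiv val ((2:Int)^k)) with hb | hb <;> rw [hb]
    · norm_num
      rw [h1]
      split
      · exact ih _ _ _ r1
      · exact ih _ _ _ r0
    · norm_num
      rw [h0]
      split
      · exact ih _ _ _ r0
      · exact ih _ _ _ r1

-- increase(x, d) on the trie corresponds to add(x, d) on the counters; off the
-- path of x's key nothing changes on either side
lemma rel_inc (x d : Int) : ∀ (k : Nat), k ≤ 18 → ∀ (pref : Int) (t : PvTrie)
    (c : PySem.Dict (Int × Int) Int), PvRel k pref t c →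
    ((pref = PySem.Int.floordiv (PySem.Int.mod x ((2:Int)^18)) ((2:Int)^k) →
        PvRel k pref (trieInc t x d k) (cntAdd c x d)) ∧
     (pref ≠ PySem.Int.floordiv (PySem.Int.mod x ((2:Int)^18)) ((2:Int)^k) →
        PvRel k pref t (cntAdd c x d))) := by
  intro k
  induction k with
  | zero => intro _ pref t c _; exact ⟨fun _ => trivial, fun _ => trivial⟩
  | succ k ih =>
    intro hk18 pref t c h
    obtain ⟨h0, h1, r0, r1⟩ := h
    have hk : k < 18 := by omega
    set xm := PySem.Int.mod x ((2:Int)^18) with hxm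
    set bit := PySem.Int.band (PySem.Int.floordiv x ((2:Int)^k)) 1 with hbit
    have hbits : bit = PySem.Int.band (PySem.Int.floordiv xm ((2:Int)^k)) 1 :=
      pvBitsAgree x k hk
    have hstep : PySem.Int.floordiv xm ((2:Int)^k)
        = 2 * PySem.Int.floordiv xm ((2:Int)^(k+1)) + bit := by
      rw [hbits]; exact pvFdivStep xm k
    have hb01 : bit = 0 ∨ bit = 1 := pvBit01 _
    constructor
    · -- on the path of x's key
      intro hpref
      have hTI : trieInc t x d (k+1)
          = t.setChild bit (trieInc
              (((match t.childOf bit with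
                  | .missing => PvTrie.node 0 .missing .missing
                  | y => y)).addGo d) x d k) := by
        rw [hbit, trieInc]
      rcases hb01 with hb | hb
      · -- bit = 0: the 0-child is rebuilt, the 1-child is untouched
        rw [hb] at hTI hstep
        rw [hTI]
        set w := trieInc (((match t.childOf 0 with
            | .missing => PvTrie.node 0 .missing .missing
            | y => y)).addGo d) x d k with hw
        have hc0 : (t.setChild 0 w).childOf 0 = w := by
          rw [childOf_setChild t w 0 0 (Or.inl rfl) (Or.inl rfl)]; simp
        have hc1 : (t.setChild 0 w).childOf 1 = t.childOf 1 := by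
          rw [childOf_setChild t w 0 1 (Or.inl rfl) (Or.inr rfl)]; norm_num
        have hgo : w.goOf = (t.childOf 0).goOf + d := by
          rw [hw, goOf_trieInc, goOf_norm_addGo]
        have hrel0 : PvRel k (2*pref) ((match t.childOf 0 with
            | .missing => PvTrie.node 0 .missing .missing
            | y => y).addGo d) c :=
          rel_of_childOf _ _ _ _ _
            (by rw [childOf_addGo, childOf_norm]) (by rw [childOf_addGo, childOf_norm]) r0
        refine ⟨?_, ?_, ?_, ?_⟩
        · rw [hc0, cntAdd_getD, ← hxm, if_pos ⟨hk, by omega⟩, hgo]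
          omega
        · rw [hc1, cntAdd_getD, ← hxm, if_neg (by rintro ⟨_, hq⟩; omega), zero_add]
          exact h1
        · rw [hc0]
          exact (ih (by omega) _ _ _ hrel0).1 (by omega)
        · rw [hc1]
          exact (ih (by omega) _ _ _ r1).2 (by omega)
      · -- bit = 1: the 1-child is rebuilt, the 0-child is untouched
        rw [hb] at hTI hstep
        rw [hTI]
        set w := trieInc (((match t.childOf 1 with
            | .missing => PvTrie.node 0 .missing .missing
            | y => y)).addGo d) x d k with hw
        have hc0 : (t.setChild 1 w).childOf 0 = t.childOf 0 := by
          rw [childOf_setChild t w 1 0 (Or.inr rfl) (Or.inl rfl)]; norm_num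
        have hc1 : (t.setChild 1 w).childOf 1 = w := by
          rw [childOf_setChild t w 1 1 (Or.inr rfl) (Or.inr rfl)]; simp
        have hgo : w.goOf = (t.childOf 1).goOf + d := by
          rw [hw, goOf_trieInc, goOf_norm_addGo]
        have hrel1 : PvRel k (2*pref+1) ((match t.childOf 1 with
            | .missing => PvTrie.node 0 .missing .missing
            | y => y).addGo d) c :=
          rel_of_childOf _ _ _ _ _
            (by rw [childOf_addGo, childOf_norm]) (by rw [childOf_addGo, childOf_norm]) r1
        refine ⟨?_, ?_, ?_, ?_⟩
        · rw [hc0, cntAdd_getD, ← hxm, if_neg (by rintro ⟨_, hq⟩; omega), zero_add]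
          exact h0
        · rw [hc1, cntAdd_getD, ← hxm, if_pos ⟨hk, by omega⟩, hgo]
          omega
        · rw [hc0]
          exact (ih (by omega) _ _ _ r0).2 (by omega)
        · rw [hc1]
          exact (ih (by omega) _ _ _ hrel1).1 (by omega)
    · -- off the path: the trie is untouched and all touched counters are elsewhere
      intro hpref
      have hne : ∀ b : Int, b = 0 ∨ b = 1 →
          2 * pref + b ≠ PySem.Int.floordiv xm ((2:Int)^k) := by
        intro b hb hcontra
        rw [hstep] at hcontra
        rcases hb with hb | hb <;> rcases hb01 with hb' | hb' <;> omega
      refine ⟨?_, ?_, ?_, ?_⟩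
      · rw [cntAdd_getD, ← hxm,
          if_neg (by rintro ⟨_, hq⟩; exact hne 0 (Or.inl rfl) (by omega)), zero_add]
        exact h0
      · rw [cntAdd_getD, ← hxm,
          if_neg (by rintro ⟨_, hq⟩; exact hne 1 (Or.inr rfl) hq), zero_add]
        exact h1
      · exact (ih (by omega) _ _ _ r0).2 (fun hcon => hne 0 (Or.inl rfl) (by omega))
      · exact (ih (by omega) _ _ _ r1).2 (fun hcon => hne 1 (Or.inr rfl) hcon)

lemma rel_cntAdd_top (t : PvTrie) (c : PySem.Dict (Int × Int) Int) (u d : Int)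
    (h : PvRel 18 0 t c) : PvRel 18 0 (trieInc t u d 18) (cntAdd c u d) := by
  have h0 := PySem.Int.mod_nonneg u (b := (2:Int)^18) (by positivity)
  have h1 := PySem.Int.mod_lt u (b := (2:Int)^18) (by positivity)
  exact (rel_inc u d 18 (le_refl 18) 0 t c h).1 (pvFdivTop _ h0 h1).symm

lemma rel_init : PvRel 18 0 (PvTrie.node 0 .missing .missing)
    (PySem.Dict.empty : PySem.Dict (Int × Int) Int) := by
  refine rel_of_childOf 18 0 PvTrie.missing _ _ ?_ ?_ (rel_missing_empty 18 0) <;>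
    simp [PvTrie.childOf]

-- zeta-expanded forms of the two visit helpers (keeps unification from evaluating them)
lemma visitNode_eq (qbn : List (List (Int × Int))) (u : Int) (t : PvTrie) (ans : List Int) :
    visitNode qbn u (t, ans)
      = (trieInc t u 1 18,
         (PySem.List.pyGetD qbn u []).foldl
           (fun a vi => a.set vi.2.toNat (trieFind (trieInc t u 1 18) vi.1 18 0)) ans) := by
  unfold visitNode
  rfl

lemma visitAlt_eq (qbn : List (List (Int × Int))) (u : Int)
    (c : PySem.Dict (Int × Int) Int) (ans : List Int) :
    visitAlt qbn u (c, ans)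
      = (cntAdd c u 1,
         (PySem.List.pyGetD qbn u []).foldl
           (fun a vi => a.set vi.2.toNat (cntFindAux (cntAdd c u 1) vi.1 18 0 0)) ans) := by
  unfold visitAlt
  rfl

-- answering one node's queries: same trie counts, same answers
lemma visit_eq (qbn : List (List (Int × Int))) (u : Int) (t : PvTrie)
    (c : PySem.Dict (Int × Int) Int) (ans : List Int) (h : PvRel 18 0 t c) :
    PvRel 18 0 (visitNode qbn u (t, ans)).1 (visitAlt qbn u (c, ans)).1 ∧
      (visitNode qbn u (t, ans)).2 = (visitAlt qbn u (c, ans)).2 := by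
  have h1 : PvRel 18 0 (trieInc t u 1 18) (cntAdd c u 1) := rel_cntAdd_top t c u 1 h
  have hfun : (fun (a : List Int) (vi : Int × Int) =>
        a.set vi.2.toNat (trieFind (trieInc t u 1 18) vi.1 18 0))
      = (fun (a : List Int) (vi : Int × Int) =>
        a.set vi.2.toNat (cntFindAux (cntAdd c u 1) vi.1 18 0 0)) := by
    funext a vi
    rw [find_eq (cntAdd c u 1) vi.1 18 0 0 (trieInc t u 1 18) h1]
  rw [visitNode_eq, visitAlt_eq, hfun]
  dsimp only
  exact ⟨h1, rfl⟩

-- the two dfs routines keep their states related and their answer lists equal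
lemma dfs_eq (graph : List (List Int)) (qbn : List (List (Int × Int))) :
    ∀ (f : Nat) (u : Int) (stA : PvTrie × List Int)
      (stB : PySem.Dict (Int × Int) Int × List Int),
      PvRel 18 0 stA.1 stB.1 → stA.2 = stB.2 →
      PvRel 18 0 (dfsA graph qbn f u stA).1 (dfsB graph qbn f u stB).1 ∧
        (dfsA graph qbn f u stA).2 = (dfsB graph qbn f u stB).2 := by
  intro f
  induction f with
  | zero => intro u stA stB h he; exact ⟨h, he⟩
  | succ f ih =>
    intro u stA stB h he
    obtain ⟨t, ansA⟩ := stA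
    obtain ⟨c, ansB⟩ := stB
    simp only at h he
    subst he
    have hv := visit_eq qbn u t c ansA h
    have hfold : ∀ (l : List Int) (sA : PvTrie × List Int)
        (sB : PySem.Dict (Int × Int) Int × List Int),
        PvRel 18 0 sA.1 sB.1 → sA.2 = sB.2 →
        PvRel 18 0 (l.foldl (fun s v => dfsA graph qbn f v s) sA).1
            (l.foldl (fun s v => dfsB graph qbn f v s) sB).1 ∧
          (l.foldl (fun s v => dfsA graph qbn f v s) sA).2
            = (l.foldl (fun s v => dfsB graph qbn f v s) sB).2 := by
      intro l
      induction l with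
      | nil => intro sA sB hr heq; exact ⟨hr, heq⟩
      | cons v vs ihl =>
        intro sA sB hr heq
        simp only [List.foldl_cons]
        exact ihl _ _ (ih v sA sB hr heq).1 (ih v sA sB hr heq).2
    obtain ⟨hr2, he2⟩ := hfold (PySem.List.pyGetD graph u [])
      (visitNode qbn u (t, ansA)) (visitAlt qbn u (c, ansA)) hv.1 hv.2
    rw [dfsA, dfsB]
    dsimp only
    exact ⟨rel_cntAdd_top _ _ u (-1) hr2, he2⟩

lemma ports_agree (parents : List Int) (queries : List (List Int)) :
    maxGeneticDifference parents queries = maxGeneticDifference_alt parents queries := by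
  unfold maxGeneticDifference maxGeneticDifference_alt
  dsimp only
  rw [runAlt_enter, runAlt]
  exact (dfs_eq (buildGraph parents).1 (buildQbn parents.length queries)
      (parents.length + 1) (buildGraph parents).2
      (PvTrie.node 0 .missing .missing, List.replicate queries.length (-1))
      (PySem.Dict.empty, List.replicate queries.length (-1))
      rel_init rfl).2

-- ===== VERDICT (by name: the statement is the Claim_ definition above) =====
theorem maxGeneticDifference_spec : Claim_equal_maxGeneticDifference := by
  intro parents queries _ _
  unfold Spec_maxGeneticDifference
  exact ports_agree parents queries
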